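-- pv_equiv track=rewrite | github.com/GabrielWechta/warm_cedar | rok 3/jezyki_formalne_i_techniki_translacji/laboratoria/lista_1/FA.py | generate_transition_table
-- ===== SOURCE A (Python) =====
-- def generate_transition_table(pattern, alphabet):
--     m = len(pattern)
--     trans = [{c: 0 for c in alphabet} for i in range(m)]
--     for s in range(m):
--         for c in alphabet:
--             k = min(m, s + 1)
--             while (pattern[:s] + c)[-k:] != pattern[:k]:
--                 k -= 1
--             if k < 0:
--                 trans[s][c] = 0
--             else:
--                 trans[s][c] = k
--
--     return trans
-- ===== SOURCE B (Python) =====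
-- def generate_transition_table(pattern, alphabet):
--     m = len(pattern)
--     alpha = list(dict.fromkeys(alphabet))
--     # track pattern characters too, so the running automaton state can be
--     # advanced even on pattern characters outside the alphabet
--     full = list(dict.fromkeys(alphabet + pattern))
--     if m == 0:
--         return []
--     rows = [{c: (1 if c == pattern[0] else 0) for c in full}]
--     x = 0  # state reached after feeding pattern[1:j]
--     for j in range(1, m):
--         rows.append({c: (j + 1 if c == pattern[j] else rows[x][c]) for c in full})
--         x = rows[x][pattern[j]]
--     return [{c: row[c] for c in alpha} for row in rows]
-- ===== Notes on version B (the rewrite author's own statement) =====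
-- stated objective: faster
-- what changed: A recomputes every DFA entry by brute-force downward scan over all candidate border lengths with string slicing (O(m^3*|alphabet|)); B builds the automaton incrementally in one pass, filling row s from the already-built row of the running failure state X and advancing X through the table itself (Sedgewick-style KMP DFA construction, O(m*|alphabet|)).
import Mathlib
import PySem

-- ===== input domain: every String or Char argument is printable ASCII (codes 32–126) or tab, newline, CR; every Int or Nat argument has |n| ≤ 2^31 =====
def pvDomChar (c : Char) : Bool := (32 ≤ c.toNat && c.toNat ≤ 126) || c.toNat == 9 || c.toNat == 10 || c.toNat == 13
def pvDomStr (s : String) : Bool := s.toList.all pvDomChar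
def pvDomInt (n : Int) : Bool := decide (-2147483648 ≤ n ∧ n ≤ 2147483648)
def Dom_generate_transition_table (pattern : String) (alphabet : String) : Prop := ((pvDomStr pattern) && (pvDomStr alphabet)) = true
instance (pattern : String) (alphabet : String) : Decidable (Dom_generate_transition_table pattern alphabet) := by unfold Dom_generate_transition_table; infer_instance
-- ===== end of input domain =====

-- B replaces A's per-entry brute-force scan over all candidate border lengths by a one-pass
-- incremental DFA construction (row s is filled from the row of the running failure state);
-- objective: faster (asymptotically, O(m·|Σ|) vs A's O(m³·|Σ|)).

-- ===== PORT A =====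

-- termination helper for the while-loop of A: once k is at or below both -len(pattern) and
-- -len(x), the two Python slices are both empty, so the loop condition is False.
theorem pvSliceFrom_neg_empty (xs : List Char) (k : Int) (h : k ≤ -(xs.length : Int)) :
    PySem.List.slice xs (some (-k)) none = [] := by
  rw [PySem.List.slice_some_none]
  apply List.drop_eq_nil_of_le
  unfold PySem.List.clampIdx
  split <;> rename_i h1
  · split <;> omega
  · simp; omega

theorem pvSliceTo_neg_empty (xs : List Char) (k : Int) (h : k ≤ -(xs.length : Int)) :
    PySem.List.slice xs none (some k) = [] := by
  have : PySem.List.slice xs none (some k) = xs.take (PySem.List.clampIdx xs.length k) := by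
    simp [PySem.List.slice]
  rw [this]
  have h0 : PySem.List.clampIdx xs.length k = 0 := by
    unfold PySem.List.clampIdx
    split <;> rename_i h1
    · split <;> omega
    · omega
  simp [h0]

-- `while (pattern[:s] + c)[-k:] != pattern[:k]: k -= 1`  (x is the value of pattern[:s] + c)
def pvWhileK (p x : List Char) (k : Int) : Int :=
  if PySem.List.slice x (some (-k)) none ≠ PySem.List.slice p none (some k) then
    pvWhileK p x (k - 1)
  else k
termination_by (k + p.length + x.length).toNat
decreasing_by
  rename_i h
  have h1 : ¬ (k ≤ -(p.length : Int) ∧ k ≤ -(x.length : Int)) := by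
    rintro ⟨hp, hx⟩
    exact h (by rw [pvSliceFrom_neg_empty x k hx, pvSliceTo_neg_empty p k hp])
  omega

def generate_transition_table (pattern : String) (alphabet : String) : List (List (String × Int)) :=
  let p := pattern.toList
  let al := alphabet.toList
  let m := p.length
  -- trans = [{c: 0 for c in alphabet} for i in range(m)]
  let init : List (PySem.Dict Char Int) :=
    (List.range m).map (fun _ => al.foldl (fun d c => d.insert c 0) PySem.Dict.empty)
  let final : List (PySem.Dict Char Int) :=
    (List.range m).foldl (fun trans (s : Nat) =>
      al.foldl (fun trans c =>
        let k := pvWhileK p (PySem.List.slice p none (some (s : Int)) ++ [c])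
                   (min (m : Int) ((s : Int) + 1))
        let v : Int := if k < 0 then 0 else k
        -- trans[s][c] = v  (s < len(trans) always, so the getD default is unreachable)
        trans.set s ((trans.getD s PySem.Dict.empty).insert c v)) trans) init
  final.map (fun d => d.items.map (fun q => (q.1.toString, q.2)))

-- ===== PORT B =====

def generate_transition_table_alt (pattern : String) (alphabet : String) : List (List (String × Int)) :=
  let p := pattern.toList
  let m := p.length
  let alpha := PySem.List.dedup alphabet.toList
  let full := PySem.List.dedup (alphabet.toList ++ p)
  if m = 0 then []
  else
    -- pattern[0]: in range since m ≠ 0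
    let p0 := p.headI
    let row0 : PySem.Dict Char Int :=
      full.foldl (fun d c => d.insert c (if c = p0 then 1 else 0)) PySem.Dict.empty
    let st :=
      (PySem.List.pyRange 1 (m : Int)).foldl
        (fun (st : List (PySem.Dict Char Int) × Int) j =>
          let rows := st.1
          let x := st.2
          let pj : Char := (PySem.List.pyGet? p j).getD ' '              -- pattern[j], 1 ≤ j < m
          let rowx : PySem.Dict Char Int :=
            (PySem.List.pyGet? rows x).getD PySem.Dict.empty             -- rows[x], 0 ≤ x < j
          (rows ++ [full.foldl
              (fun d c => d.insert c (if c = pj then (j : Int) + 1 else rowx.getD c 0))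
              PySem.Dict.empty],
           rowx.getD pj 0))
        ([row0], 0)
    st.1.map (fun row =>
      (alpha.foldl (fun d c => d.insert c (row.getD c 0)) PySem.Dict.empty).items.map
        (fun q => (q.1.toString, q.2)))

-- ===== PRECONDITION & SPEC =====
def Spec_generate_transition_table (pattern : String) (alphabet : String) (out : List (List (String × Int))) : Prop := out = generate_transition_table_alt pattern alphabet
instance (pattern : String) (alphabet : String) (out : List (List (String × Int))) : Decidable (Spec_generate_transition_table pattern alphabet out) := by unfold Spec_generate_transition_table; infer_instance

-- ===== CLAIM (what is proved, stated in full; the proofs are below) =====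
def Claim_equal_generate_transition_table : Prop := ∀ (pattern : String) (alphabet : String), Dom_generate_transition_table pattern alphabet → Spec_generate_transition_table pattern alphabet (generate_transition_table pattern alphabet)

-- ===== LEMMAS AND PROOFS =====

def pvSig (p x : List Char) : Nat :=
  Nat.findGreatest (fun k => p.take k <:+ x) (min p.length x.length)

theorem pvSig_le (p x : List Char) : pvSig p x ≤ min p.length x.length :=
  Nat.findGreatest_le _

theorem pvSig_suffix (p x : List Char) : p.take (pvSig p x) <:+ x := by
  unfold pvSig
  refine Nat.findGreatest_spec (P := fun k => p.take k <:+ x) (Nat.zero_le _) ?_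
  simp

theorem pvSig_ge (p x : List Char) (k : Nat) (hk : k ≤ p.length) (hk2 : k ≤ x.length)
    (hs : p.take k <:+ x) : k ≤ pvSig p x :=
  Nat.le_findGreatest (le_min hk hk2) hs

theorem pvSig_max (p x : List Char) (k : Nat) (h : pvSig p x < k) (hk : k ≤ p.length)
    (hk2 : k ≤ x.length) : ¬ p.take k <:+ x :=
  Nat.findGreatest_is_greatest h (le_min hk hk2)

theorem pvSig_prefix (p x : List Char) (h : x <+: p) : pvSig p x = x.length := by
  refine le_antisymm (le_trans (pvSig_le p x) (min_le_right _ _)) ?_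
  refine pvSig_ge p x x.length h.length_le le_rfl ?_
  rw [← List.prefix_iff_eq_take.mp h]

theorem pvSuffix_concat_iff (u v : List Char) (a b : Char) :
    u ++ [a] <:+ v ++ [b] ↔ a = b ∧ u <:+ v := by
  constructor
  · rintro ⟨t, ht⟩
    rw [← List.append_assoc] at ht
    have h := List.append_inj' ht rfl
    exact ⟨by simpa using h.2, ⟨t, h.1⟩⟩
  · rintro ⟨rfl, t, rfl⟩
    exact ⟨t, by simp⟩

theorem pvTake_concat (p : List Char) (k : Nat) (h1 : 1 ≤ k) (hk : k ≤ p.length) :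
    p.take k = p.take (k-1) ++ [p[k-1]'(by omega)] := by
  conv_lhs => rw [show k = (k-1)+1 by omega]
  rw [List.take_add_one, List.getElem?_eq_getElem (by omega)]
  rfl

theorem pvCand_concat (p y : List Char) (c : Char) (k : Nat) (h1 : 1 ≤ k) (hk : k ≤ p.length) :
    (p.take k <:+ y ++ [c]) ↔ p[k-1]'(by omega) = c ∧ p.take (k-1) <:+ y := by
  rw [pvTake_concat p k h1 hk, pvSuffix_concat_iff]

theorem pvSig_core (p y : List Char) (c : Char) :
    pvSig p (y ++ [c]) = pvSig p (p.take (pvSig p y) ++ [c]) := by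
  set gy := pvSig p y with hgy
  have hgyle := pvSig_le p y
  apply le_antisymm
  · set g1 := pvSig p (y ++ [c]) with hg1
    rcases Nat.eq_zero_or_pos g1 with h0 | hpos
    · omega
    · have hle := pvSig_le p (y ++ [c])
      have hm : g1 ≤ p.length := le_trans hle (min_le_left _ _)
      have hsuf := pvSig_suffix p (y ++ [c])
      rw [← hg1, pvCand_concat p y c g1 hpos hm] at hsuf
      obtain ⟨hc, hsf⟩ := hsuf
      -- g1 - 1 is a candidate for y, hence ≤ gy
      have hky : g1 - 1 ≤ gy := by
        refine pvSig_ge p y (g1-1) (by omega) ?_ hsf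
        have : g1 ≤ (y ++ [c]).length := le_trans hle (min_le_right _ _)
        simp at this; omega
      -- take (g1-1) p is a suffix of take gy p
      have hsub : p.take (g1-1) <:+ p.take gy :=
        List.suffix_of_suffix_length_le hsf (pvSig_suffix p y)
          (by simp; omega)
      refine pvSig_ge p _ g1 hm ?_ ?_
      · simp
        have : gy ≤ p.length := le_trans hgyle (min_le_left _ _)
        omega
      · rw [pvCand_concat p _ c g1 hpos hm]
        exact ⟨hc, hsub⟩
  · set g2 := pvSig p (p.take gy ++ [c]) with hg2
    rcases Nat.eq_zero_or_pos g2 with h0 | hpos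
    · omega
    · have hle := pvSig_le p (p.take gy ++ [c])
      have hm : g2 ≤ p.length := le_trans hle (min_le_left _ _)
      have hsuf := pvSig_suffix p (p.take gy ++ [c])
      rw [← hg2, pvCand_concat p _ c g2 hpos hm] at hsuf
      obtain ⟨hc, hsf⟩ := hsuf
      have hsfy : p.take (g2-1) <:+ y := hsf.trans (pvSig_suffix p y)
      have hle' : g2 ≤ gy + 1 := by simp at hle; omega
      refine pvSig_ge p _ g2 hm (by simp; omega) ?_
      rw [pvCand_concat p y c g2 hpos hm]
      exact ⟨hc, hsfy⟩

theorem pvSig_nil (p : List Char) : pvSig p [] = 0 := by simp [pvSig]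

theorem pvSuffix_tail (u v : List Char) (h : u <:+ v) (hl : u.length < v.length) : u <:+ v.tail := by
  cases v with
  | nil => simp at hl
  | cons a t =>
    rcases List.suffix_cons_iff.mp h with h1 | h1
    · subst h1; simp at hl
    · simpa using h1

theorem pvSig_advance (p : List Char) (s : Nat) (h : s < p.length) :
    pvSig p (p.take s ++ [p[s]]) = s + 1 := by
  have ht : p.take (s+1) = p.take s ++ [p[s]] := by
    have := pvTake_concat p (s+1) (by omega) (by omega)
    simpa using this
  rw [← ht, pvSig_prefix p _ (List.take_prefix _ _), List.length_take]
  omega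

theorem pvSig_tail (p : List Char) (s : Nat) (c : Char) (hs : 1 ≤ s) (hm : s < p.length)
    (hc : c ≠ p[s]) :
    pvSig p (p.take s ++ [c]) = pvSig p ((p.take s).tail ++ [c]) := by
  have hlt : (p.take s).length = s := by simp; omega
  have hlt' : ((p.take s).tail ++ [c]).length = s := by simp [hlt]; omega
  apply le_antisymm
  · set g1 := pvSig p (p.take s ++ [c]) with hg1
    rcases Nat.eq_zero_or_pos g1 with h0 | hpos
    · omega
    · have hle := pvSig_le p (p.take s ++ [c])
      have hmg : g1 ≤ p.length := le_trans hle (min_le_left _ _)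
      have hsuf := pvSig_suffix p (p.take s ++ [c])
      rw [← hg1, pvCand_concat p _ c g1 hpos hmg] at hsuf
      obtain ⟨hcc, hsf⟩ := hsuf
      have hg1s : g1 ≤ s := by
        by_contra hgt
        have : g1 = s + 1 := by
          have : g1 ≤ (p.take s ++ [c]).length := le_trans hle (min_le_right _ _)
          simp [hlt] at this; omega
        have hps : p[s] = c := by
          convert hcc using 2 <;> omega
        exact hc hps.symm
      refine pvSig_ge p _ g1 hmg (by omega) ?_
      rw [pvCand_concat p _ c g1 hpos hmg]
      refine ⟨hcc, ?_⟩
      rcases Nat.eq_zero_or_pos (g1 - 1) with hz | hp1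
      · rw [hz]; simp
      · exact pvSuffix_tail _ _ hsf (by simp [hlt]; omega)
  · set g2 := pvSig p ((p.take s).tail ++ [c]) with hg2
    rcases Nat.eq_zero_or_pos g2 with h0 | hpos
    · omega
    · have hle := pvSig_le p ((p.take s).tail ++ [c])
      have hmg : g2 ≤ p.length := le_trans hle (min_le_left _ _)
      have hsuf := pvSig_suffix p ((p.take s).tail ++ [c])
      rw [← hg2, pvCand_concat p _ c g2 hpos hmg] at hsuf
      obtain ⟨hcc, hsf⟩ := hsuf
      have hg2s : g2 ≤ s := by
        have : g2 ≤ ((p.take s).tail ++ [c]).length := le_trans hle (min_le_right _ _)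
        omega
      refine pvSig_ge p _ g2 hmg (by simp [hlt]; omega) ?_
      rw [pvCand_concat p _ c g2 hpos hmg]
      exact ⟨hcc, hsf.trans (List.tail_suffix _)⟩

theorem pvSig_row0 (p : List Char) (c : Char) (h : p ≠ []) :
    pvSig p [c] = if c = p.headI then 1 else 0 := by
  cases p with
  | nil => simp at h
  | cons a t =>
    by_cases hca : c = a
    · subst hca
      have := pvSig_advance (c :: t) 0 (by simp)
      simpa using this
    · simp [List.headI, hca]
      unfold pvSig
      rw [Nat.findGreatest_eq_zero_iff]
      intro n h0 hle hsf
      have hn1 : n = 1 := by simp at hle; omega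
      subst hn1
      simp at hsf
      rcases List.suffix_cons_iff.mp hsf with h1 | h1
      · have hac : a = c := by simpa using h1
        exact hca hac.symm
      · simp at h1

theorem pvWhileK_le (p x : List Char) (k : Int) : pvWhileK p x k ≤ k := by
  fun_induction pvWhileK with
  | case1 k h ih => omega
  | case2 k h => omega

-- the loop condition at a positive k within range is exactly the border test
theorem pvCond_iff (p x : List Char) (k : Nat) (h1 : 1  ≤ k) (hkm : k ≤ p.length)
    (hkn : k ≤ x.length) :
    PySem.List.slice x (some (-(k:Int))) none = PySem.List.slice p none (some (k:Int)) ↔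
      p.take k <:+ x := by
  rw [PySem.List.slice_from_neg_natCast x k (by omega), PySem.List.slice_to_natCast]
  constructor
  · intro h
    rw [← h]
    exact List.drop_suffix _ _
  · intro h
    have h2 := List.suffix_iff_eq_drop.mp h
    rw [List.length_take] at h2
    rw [show x.length - k = x.length - min k p.length by omega]
    exact h2.symm

theorem pvCond_zero (p x : List Char) :
    (PySem.List.slice x (some (-(0:Int))) none = PySem.List.slice p none (some (0:Int))) ↔
      x = [] := by
  have h1 : PySem.List.slice x (some (-(0:Int))) none = x := by
    norm_num
  have h2 : PySem.List.slice p none (some (0:Int)) = [] := by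
    have := PySem.List.slice_to_natCast p 0
    simpa using this
  rw [h1, h2]

theorem pvWhileK_at_sig_pos (p x : List Char) (hpos : 1 ≤ pvSig p x) :
    pvWhileK p x (pvSig p x : Int) = pvSig p x := by
  rw [pvWhileK, if_neg]
  intro hne
  apply hne
  rw [pvCond_iff p x _ hpos (le_trans (pvSig_le p x) (min_le_left _ _))
    (le_trans (pvSig_le p x) (min_le_right _ _))]
  exact pvSig_suffix p x

theorem pvWhileK_descend (p x : List Char) (hx : x ≠ []) :
    ∀ k : Nat, k ≤ min p.length x.length → pvSig p x ≤ k →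
      pvWhileK p x (k : Int) = pvWhileK p x (pvSig p x : Int) := by
  intro k
  induction k with
  | zero => intro _ h; interval_cases h' : pvSig p x <;> simp_all
  | succ k ih =>
    intro hle hsig
    by_cases he : pvSig p x = k + 1
    · rw [he]
    · have hcond : ¬ (p.take (k+1) <:+ x) :=
        pvSig_max p x (k+1) (by omega) (by omega) (by omega)
      rw [pvWhileK, if_pos]
      · have hc : ((k+1 : Nat) : Int) - 1 = (k : Int) := by push_cast; ring
        rw [hc]
        exact ih (by omega) (by omega)
      · rw [Ne, pvCond_iff p x (k+1) (by omega) (by omega) (by omega)]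
        exact hcond

theorem pvWhileK_eq_sig (p x : List Char) (hx : x ≠ []) (k : Nat)
    (hk : pvSig p x ≤ k) (hk2 : k ≤ min p.length x.length) :
    (if pvWhileK p x (k : Int) < 0 then (0:Int) else pvWhileK p x (k : Int)) = (pvSig p x : Int) := by
  rw [pvWhileK_descend p x hx k hk2 hk]
  rcases Nat.eq_zero_or_pos (pvSig p x) with h0 | hpos
  · rw [h0]
    have hcond : PySem.List.slice x (some (-((0:Nat):Int))) none ≠
        PySem.List.slice p none (some ((0:Nat):Int)) := by
      intro hcontra
      rw [show ((0:Nat):Int) = (0:Int) by norm_num, pvCond_zero] at hcontra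
      exact hx hcontra
    have hval : pvWhileK p x ((0:Nat):Int) < 0 := by
      have hstep : pvWhileK p x ((0:Nat):Int) = pvWhileK p x (((0:Nat):Int) - 1) := by
        rw [pvWhileK, if_pos hcond]
      have hle := pvWhileK_le p x (((0:Nat):Int) - 1)
      omega
    rw [if_pos hval]
    norm_num
  · rw [pvWhileK_at_sig_pos p x hpos]
    rw [if_neg (by omega)]

theorem pvDict_eta (d : PySem.Dict Char Int) : d = PySem.Dict.mk d.items := rfl

theorem pvContains_map (ks : List Char) (g : Char → Int) (c : Char) :
    (PySem.Dict.mk (ks.map (fun k => (k, g k)))).contains c = decide (c ∈ ks) := by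
  induction ks with
  | nil => simp [PySem.Dict.contains]
  | cons a t ih =>
    by_cases hac : a = c
    · subst hac; simp [PySem.Dict.contains]
    · have hca : ¬ c = a := fun h => hac h.symm
      simp only [PySem.Dict.contains] at ih ⊢
      simp [hac, hca, ih]

theorem pvGet?_map (ks : List Char) (g : Char → Int) (c : Char) :
    (PySem.Dict.mk (ks.map (fun k => (k, g k)))).get? c =
      if c ∈ ks then some (g c) else none := by
  induction ks with
  | nil => simp [PySem.Dict.get?]
  | cons a t ih =>
    by_cases hac : a = c
    · subst hac; simp [PySem.Dict.get?]
    · simp only [PySem.Dict.get?] at ih ⊢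
      simp only [List.map_cons, List.find?_cons]
      have hb : (((a, g a) : Char × Int).1 == c) = false := by simpa using hac
      rw [hb]
      rw [ih]
      have hca : ¬ c = a := fun h => hac h.symm
      simp [hca]

theorem pvGetD_map (ks : List Char) (g : Char → Int) (c : Char) (v0 : Int) :
    (PySem.Dict.mk (ks.map (fun k => (k, g k)))).getD c v0 = if c ∈ ks then g c else v0 := by
  rw [PySem.Dict.getD, pvGet?_map]
  split <;> simp

theorem pvInsert_map (ks : List Char) (g : Char → Int) (c : Char) (v : Int) (hc : c ∈ ks) :
    (PySem.Dict.mk (ks.map (fun k => (k, g k)))).insert c v =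
      PySem.Dict.mk (ks.map (fun k => (k, if k = c then v else g k))) := by
  rw [pvDict_eta ((PySem.Dict.mk (ks.map (fun k => (k, g k)))).insert c v)]
  rw [PySem.Dict.items_insert_of_contains _ v (by rw [pvContains_map]; simpa using hc)]
  congr 1
  rw [List.map_map]
  apply List.map_congr_left
  intro k hk
  by_cases hkc : k = c
  · subst hkc; simp
  · simp [hkc]

theorem pvFoldl_insert_overwrite (al : List Char) :
    ∀ (ks : List Char) (g f : Char → Int), (∀ c ∈ al, c ∈ ks) →
    al.foldl (fun d c => d.insert c (f c)) (PySem.Dict.mk (ks.map (fun k => (k, g k)))) =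
      PySem.Dict.mk (ks.map (fun k => (k, if k ∈ al then f k else g k))) := by
  induction al with
  | nil => intro ks g f _; simp
  | cons c al ih =>
    intro ks g f h
    simp only [List.foldl_cons]
    rw [pvInsert_map ks g c (f c) (h c (by simp))]
    rw [ih ks _ f (fun c' hc' => h c' (by simp [hc']))]
    congr 1
    apply List.map_congr_left
    intro k hk
    by_cases h1 : k ∈ al <;> by_cases h2 : k = c <;> simp_all

theorem pvFoldl_insert_fresh_gen (ks : List Char) (f : Char → Int) :
    ∀ (d : PySem.Dict Char Int), ks.Nodup → (∀ c ∈ ks, d.contains c = false) →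
    ks.foldl (fun d c => d.insert c (f c)) d =
      PySem.Dict.mk (d.items ++ ks.map (fun c => (c, f c))) := by
  induction ks with
  | nil => intro d _ _; simpa using (pvDict_eta d)
  | cons c t ih =>
    intro d hnd h
    simp only [List.foldl_cons]
    have hins : d.insert c (f c) = PySem.Dict.mk (d.items ++ [(c, f c)]) := by
      rw [pvDict_eta (d.insert c (f c)),
        PySem.Dict.items_insert_of_not_contains _ _ (h c (by simp))]
    rw [hins]
    rw [ih _ (by simp_all) ?_]
    · simp
    · intro c' hc'
      have hcc : c' ≠ c := by rintro rfl; simp_all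
      have hthis := h c' (by simp [hc'])
      simp only [PySem.Dict.contains] at hthis ⊢
      simp [List.any_append, hthis, Ne.symm hcc]

theorem pvFoldl_insert_fresh (ks : List Char) (f : Char → Int) (hks : ks.Nodup) :
    ks.foldl (fun d c => d.insert c (f c)) PySem.Dict.empty =
      PySem.Dict.mk (ks.map (fun c => (c, f c))) := by
  rw [pvFoldl_insert_fresh_gen ks f PySem.Dict.empty hks (by intro c _; simp [PySem.Dict.contains, PySem.Dict.empty])]
  simp [PySem.Dict.empty]

theorem pvZero_dict_gen (al : List Char) :
    ∀ ks : List Char,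
    al.foldl (fun d c => d.insert c (0:Int)) (PySem.Dict.mk (ks.map (fun k => (k, (0:Int))))) =
      PySem.Dict.mk ((PySem.Set.update ks al).map (fun k => (k, (0:Int)))) := by
  induction al with
  | nil => intro ks; simp [PySem.Set.update]
  | cons c al ih =>
    intro ks
    simp only [List.foldl_cons]
    by_cases hc : c ∈ ks
    · rw [pvInsert_map ks _ c 0 hc]
      have h1 : (fun k => (k, if k = c then (0:Int) else (0:Int))) = (fun k => (k, (0:Int))) := by
        funext k; simp
      rw [h1, ih ks]
      have h2 : PySem.Set.add ks c = ks := by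
        simp [PySem.Set.add, PySem.Set.contains, hc]
      simp [PySem.Set.update, h2]
    · have hins : (PySem.Dict.mk (ks.map (fun k => (k, (0:Int))))).insert c 0 =
          PySem.Dict.mk ((ks ++ [c]).map (fun k => (k, (0:Int)))) := by
        rw [pvDict_eta ((PySem.Dict.mk (ks.map (fun k => (k, (0:Int))))).insert c 0),
          PySem.Dict.items_insert_of_not_contains _ _ (by rw [pvContains_map]; simpa using hc)]
        simp
      rw [hins, ih (ks ++ [c])]
      have h2 : PySem.Set.add ks c = ks ++ [c] := by
        simp [PySem.Set.add, PySem.Set.contains, hc]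
      simp [PySem.Set.update, h2]

theorem pvZero_dict (al : List Char) :
    al.foldl (fun d c => d.insert c (0:Int)) PySem.Dict.empty =
      PySem.Dict.mk ((PySem.List.dedup al).map (fun c => (c, (0:Int)))) := by
  have := pvZero_dict_gen al []
  simpa [PySem.Dict.empty, PySem.Set.update, PySem.List.dedup, PySem.Set.ofList] using this

def pvDelta (p : List Char) (s : Nat) (c : Char) : Int :=
  (pvSig p (p.take s ++ [c]) : Int)

def pvTable (p al : List Char) : List (List (String × Int)) :=
  (List.range p.length).map
    (fun s => (PySem.List.dedup al).map (fun c => (c.toString, pvDelta p s c)))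

theorem pvGetD_map_range {α : Type} (m s : Nat) (f : Nat → α) (d : α) (hs : s < m) :
    ((List.range m).map f).getD s d = f s := by
  rw [List.getD_eq_getElem _ _ (by simpa using hs)]
  simp

theorem pvSet_map_range {α : Type} (m s : Nat) (f : Nat → α) (X : α) (hs : s < m) :
    ((List.range m).map f).set s X = (List.range m).map (fun j => if j = s then X else f j) := by
  apply List.ext_getElem (by simp)
  intro i h1 h2
  simp only [List.getElem_set, List.getElem_map, List.getElem_range]
  split <;> rename_i h3
  · simp [h3]
  · have h4 : ¬ i = s := fun h => h3 h.symm
    simp [h4]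

theorem pvInnerA (al : List Char) (v : Char → Int) (s : Nat) :
    ∀ (trans : List (PySem.Dict Char Int)), s < trans.length →
    al.foldl (fun tr c => tr.set s ((tr.getD s PySem.Dict.empty).insert c (v c))) trans
      = trans.set s (al.foldl (fun d c => d.insert c (v c)) (trans.getD s PySem.Dict.empty)) := by
  induction al with
  | nil =>
    intro trans hs
    simp only [List.foldl_nil]
    rw [List.getD_eq_getElem _ _ hs]
    exact (List.set_getElem_self hs).symm
  | cons c t ih =>
    intro trans hs
    simp only [List.foldl_cons]
    rw [ih _ (by simpa using hs)]
    rw [List.set_set]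
    congr 1
    congr 1
    rw [List.getD_eq_getElem _ _ (by simpa using hs), List.getElem_set_self, List.getD_eq_getElem _ _ hs]

theorem pvOuterA (al : List Char) (m : Nat) (v : Nat → Char → Int) :
    ∀ (S : List Nat) (G : Nat → Char → Int), (∀ s ∈ S, s < m) →
    S.foldl (fun trans (s : Nat) =>
        al.foldl (fun tr c => tr.set s ((tr.getD s PySem.Dict.empty).insert c (v s c))) trans)
      ((List.range m).map (fun j => PySem.Dict.mk ((PySem.List.dedup al).map (fun k => (k, G j k)))))
    = (List.range m).map (fun j => PySem.Dict.mk ((PySem.List.dedup al).map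
        (fun k => (k, if j ∈ S then v j k else G j k)))) := by
  intro S
  induction S with
  | nil =>
    intro G _
    simp
  | cons s S ih =>
    intro G h
    have hsm : s < m := h s (by simp)
    simp only [List.foldl_cons]
    rw [pvInnerA al (v s) s _ (by simpa using hsm)]
    rw [pvGetD_map_range m s _ _ hsm]
    rw [pvFoldl_insert_overwrite al (PySem.List.dedup al) (G s) (v s)
      (fun c hc => (PySem.List.mem_dedup al c).mpr hc)]
    rw [pvSet_map_range m s _ _ hsm]
    have hfun : (fun j => if j = s
          then PySem.Dict.mk ((PySem.List.dedup al).map (fun k => (k, if k ∈ al then v s k else G s k)))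
          else PySem.Dict.mk ((PySem.List.dedup al).map (fun k => (k, G j k))))
        = (fun j => PySem.Dict.mk ((PySem.List.dedup al).map
            (fun k => (k, if j = s then (if k ∈ al then v s k else G s k) else G j k)))) := by
      funext j
      split <;> rename_i hj <;> simp [hj]
    rw [hfun, ih _ (fun s' hs' => h s' (by simp [hs']))]
    apply List.map_congr_left
    intro j hj
    congr 1
    apply List.map_congr_left
    intro k hk
    have hkal : k ∈ al := (PySem.List.mem_dedup al k).mp hk
    by_cases h1 : j ∈ S <;> by_cases h2 : j = s <;> simp [h1, h2, hkal]

theorem pvAval_eq_delta (p : List Char) (s : Nat) (c : Char) (hs : s < p.length) :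
    (if pvWhileK p (PySem.List.slice p none (some (s : Int)) ++ [c])
          (min (p.length : Int) ((s : Int) + 1)) < 0 then (0:Int)
     else pvWhileK p (PySem.List.slice p none (some (s : Int)) ++ [c])
          (min (p.length : Int) ((s : Int) + 1)))
      = pvDelta p s c := by
  have hx : PySem.List.slice p none (some (s : Int)) ++ [c] = p.take s ++ [c] := by
    rw [PySem.List.slice_to_natCast]
  have hlen : (p.take s ++ [c]).length = s + 1 := by simp; omega
  have hmin : min (p.length : Int) ((s : Int) + 1) = ((min p.length (s+1) : Nat) : Int) := by
    push_cast; omega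
  rw [hx, hmin]
  have := pvWhileK_eq_sig p (p.take s ++ [c]) (by simp) (min p.length (s+1))
    (by have := pvSig_le p (p.take s ++ [c]); rw [hlen] at this; exact this)
    (by rw [hlen])
  exact this

theorem pvA_eq (pattern alphabet : String) :
    generate_transition_table pattern alphabet = pvTable pattern.toList alphabet.toList := by
  unfold generate_transition_table
  simp only []
  set p := pattern.toList
  set al := alphabet.toList
  rw [pvZero_dict al]
  have h0 : (List.range p.length).map (fun _ => PySem.Dict.mk ((PySem.List.dedup al).map (fun c => (c, (0:Int)))))
      = (List.range p.length).map (fun j => PySem.Dict.mk ((PySem.List.dedup al).map (fun k => (k, (fun (_ : Nat) (_ : Char) => (0:Int)) j k)))) := rfl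
  rw [h0]
  rw [pvOuterA al p.length
    (fun s c => if pvWhileK p (PySem.List.slice p none (some (s : Int)) ++ [c])
          (min ((p.length : Nat) : Int) ((s : Int) + 1)) < 0 then (0:Int)
        else pvWhileK p (PySem.List.slice p none (some (s : Int)) ++ [c])
          (min ((p.length : Nat) : Int) ((s : Int) + 1)))
    (List.range p.length) (fun _ _ => 0) (by intro s hs; simpa using hs)]
  unfold pvTable
  rw [List.map_map]
  apply List.map_congr_left
  intro s hs
  have hsm : s < p.length := by simpa using hs
  simp only [Function.comp, List.mem_range.mpr hsm, if_pos, PySem.Dict.items]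
  rw [List.map_map]
  apply List.map_congr_left
  intro c _
  simp only [Function.comp]
  rw [pvAval_eq_delta p s c hsm]

-- the fully-tracked row of state s, over the internal alphabet `full`
def pvRowF (p full : List Char) (s : Nat) : PySem.Dict Char Int :=
  PySem.Dict.mk (full.map (fun c => (c, pvDelta p s c)))

-- the running state: σ of pattern[1:j]
def pvX (p : List Char) (j : Nat) : Nat := pvSig p ((p.take j).tail)

theorem pvX_lt (p : List Char) (j : Nat) (hj : 1 ≤ j) (hjm : j ≤ p.length) : pvX p j < j := by
  have h := pvSig_le p ((p.take j).tail)
  have hl : ((p.take j).tail).length = j - 1 := by simp; omega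
  rw [hl] at h
  unfold pvX
  omega

theorem pvTailTake (p : List Char) (j : Nat) (hj : 1 ≤ j) (hjm : j < p.length) :
    (p.take (j+1)).tail = (p.take j).tail ++ [p[j]] := by
  rw [pvTake_concat p (j+1) (by omega) (by omega)]
  rw [List.tail_append_of_ne_nil]
  · simp
  · apply List.ne_nil_of_length_pos
    simp
    omega

-- δ(X j, c) = σ(pattern[1:j] ++ [c])  (core lemma specialised to the running state)
theorem pvDelta_X (p : List Char) (j : Nat) (c : Char) :
    pvDelta p (pvX p j) c = (pvSig p ((p.take j).tail ++ [c]) : Int) := by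
  unfold pvDelta pvX
  rw [pvSig_core p ((p.take j).tail) c]

theorem pvOuterB (p full : List Char) (hfull : ∀ c ∈ p, c ∈ full) (hnd : full.Nodup) :
    ∀ j : Nat, 1 ≤ j → j ≤ p.length →
    (PySem.List.pyRange 1 (j : Int)).foldl
      (fun (st : List (PySem.Dict Char Int) × Int) i =>
        (st.1 ++ [full.foldl
            (fun d c => d.insert c (if c = (PySem.List.pyGet? p i).getD ' ' then (i : Int) + 1
              else ((PySem.List.pyGet? st.1 st.2).getD PySem.Dict.empty).getD c 0))
            PySem.Dict.empty],
         ((PySem.List.pyGet? st.1 st.2).getD PySem.Dict.empty).getD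
           ((PySem.List.pyGet? p i).getD ' ') 0))
      ([pvRowF p full 0], 0)
    = ((List.range j).map (pvRowF p full), (pvX p j : Int)) := by
  intro j hj
  induction j, hj using Nat.le_induction with
  | base =>
    intro h1
    have : PySem.List.pyRange 1 ((1:Nat) : Int) = [] := by decide
    rw [this]
    simp only [List.foldl_nil]
    have hx1 : pvX p 1 = 0 := by
      unfold pvX
      cases p with
      | nil => simp [pvSig_nil]
      | cons a t => simp [pvSig_nil]
    rw [hx1]
    simp [List.range_succ]
  | succ j hj ih =>
    intro hlen
    have hjm : j < p.length := by omega
    have hcast : ((j+1 : Nat) : Int) = (j : Int) + 1 := by push_cast; ring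
    rw [hcast, PySem.List.pyRange_one_succ_right (by omega : (1:Int) ≤ (j:Int))]
    rw [List.foldl_append, ih (by omega)]
    simp only [List.foldl_cons, List.foldl_nil]
    have hpj : (PySem.List.pyGet? p (j:Int)).getD ' ' = p[j] := by
      rw [PySem.List.pyGet?_natCast]
      simp [hjm]
    have hxlt : pvX p j < j := pvX_lt p j hj (by omega)
    have hrowx : (PySem.List.pyGet? ((List.range j).map (pvRowF p full)) ((pvX p j : Nat) : Int)).getD
        PySem.Dict.empty = pvRowF p full (pvX p j) := by
      rw [PySem.List.pyGet?_natCast]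
      simp [hxlt]
    simp only [hpj, hrowx]
    rw [pvFoldl_insert_fresh full _ hnd]
    have hcomp2 : (pvRowF p full (pvX p j)).getD p[j] 0 = ((pvX p (j+1) : Nat) : Int) := by
      unfold pvRowF
      rw [pvGetD_map]
      rw [if_pos (hfull p[j] (List.getElem_mem hjm))]
      rw [pvDelta_X]
      unfold pvX
      rw [pvTailTake p j hj hjm]
    rw [hcomp2]
    have hcomp1 : PySem.Dict.mk (full.map (fun c => (c, if c = p[j] then (j:Int) + 1
        else (pvRowF p full (pvX p j)).getD c 0))) = pvRowF p full j := by
      unfold pvRowF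
      congr 1
      apply List.map_congr_left
      intro c hc
      by_cases hcp : c = p[j]
      · subst hcp
        rw [if_pos rfl]
        unfold pvDelta
        rw [pvSig_advance p j hjm]
        push_cast
        ring
      · rw [if_neg hcp]
        rw [pvGetD_map, if_pos hc, pvDelta_X]
        unfold pvDelta
        rw [pvSig_tail p j c hj hjm hcp]
    rw [hcomp1]
    rw [show List.range (j+1) = List.range j ++ [j] from List.range_succ]
    simp

theorem pvB_eq (pattern alphabet : String) :
    generate_transition_table_alt pattern alphabet = pvTable pattern.toList alphabet.toList := by
  unfold generate_transition_table_alt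
  simp only []
  set p := pattern.toList with hp
  set al := alphabet.toList with hal
  by_cases hm : p.length = 0
  · rw [if_pos hm]
    unfold pvTable
    rw [hm]
    simp
  · rw [if_neg hm]
    have hpne : p ≠ [] := by
      intro h
      rw [h] at hm
      simp at hm
    have hnd := PySem.List.nodup_dedup (al ++ p)
    have hfull : ∀ c ∈ p, c ∈ PySem.List.dedup (al ++ p) := by
      intro c hc
      rw [PySem.List.mem_dedup]
      exact List.mem_append_right _ hc
    have hrow0 : (PySem.List.dedup (al ++ p)).foldl
        (fun d c => d.insert c (if c = p.headI then (1:Int) else 0)) PySem.Dict.empty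
        = pvRowF p (PySem.List.dedup (al ++ p)) 0 := by
      rw [pvFoldl_insert_fresh _ _ hnd]
      unfold pvRowF
      congr 1
      apply List.map_congr_left
      intro c hc
      have hd : pvDelta p 0 c = if c = p.headI then 1 else 0 := by
        unfold pvDelta
        simp only [List.take_zero, List.nil_append]
        rw [pvSig_row0 p c hpne]
        split <;> simp
      rw [hd]
    rw [hrow0]
    rw [pvOuterB p (PySem.List.dedup (al ++ p)) hfull hnd p.length (by omega) le_rfl]
    unfold pvTable
    simp only []
    rw [List.map_map]
    apply List.map_congr_left
    intro s hs
    simp only [Function.comp]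
    rw [pvFoldl_insert_fresh _ _ (PySem.List.nodup_dedup al)]
    simp only [PySem.Dict.items]
    rw [List.map_map]
    apply List.map_congr_left
    intro c hc
    simp only [Function.comp]
    have hcf : c ∈ PySem.List.dedup (al ++ p) := by
      rw [PySem.List.mem_dedup]
      exact List.mem_append_left _ ((PySem.List.mem_dedup al c).mp hc)
    unfold pvRowF
    rw [pvGetD_map, if_pos hcf]

theorem pvMain (pattern alphabet : String) :
    generate_transition_table pattern alphabet = generate_transition_table_alt pattern alphabet :=
  (pvA_eq pattern alphabet).trans (pvB_eq pattern alphabet).symm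

-- ===== VERDICT (by name: the statement is the Claim_ definition above) =====
theorem generate_transition_table_spec : Claim_equal_generate_transition_table :=
  fun pattern alphabet _ => pvMain pattern alphabet
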